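-- pv_equiv track=rewrite | github.com/yxc20089/AgentBusters-Leaderboard | src/mcp_servers/judge_mcp.py | detect_stance
-- ===== SOURCE A (Python) =====
-- from typing import Any, Optional, Literal
--
-- def detect_stance(text: str) -> Optional[str]:
--     """Detect bullish/bearish stance in text."""
--     text_lower = text.lower()
--
--     bullish_signals = sum(1 for w in ["buy", "bullish", "strong", "outperform", "beat", "growth"] if w in text_lower)
--     bearish_signals = sum(1 for w in ["sell", "bearish", "weak", "underperform", "miss", "decline"] if w in text_lower)
--
--     if bullish_signals > bearish_signals:
--         return "bullish"
--     elif bearish_signals > bullish_signals: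
--         return "bearish"
--     return None
-- ===== SOURCE B (Python) =====
-- _BULLISH = ("buy", "bullish", "strong", "outperform", "beat", "growth")
-- _BEARISH = ("sell", "bearish", "weak", "underperform", "miss", "decline")
--
--
-- def detect_stance(text):
--     """Detect stance by scanning the text once, position by position,
--     matching every keyword in place with startswith (no per-keyword
--     substring search); then tally the set of matched keywords."""
--     t = text.lower()
--     found = set()
--     for i in range(len(t)):
--         for w in _BULLISH + _BEARISH:
--             if t.startswith(w, i):
--                 found.add(w)
--     bull = sum(1 for w in _BULLISH if w in found)
--     bear = sum(1 for w in _BEARISH if w in found)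
--     if bull > bear:
--         return "bullish"
--     if bear > bull:
--         return "bearish"
--     return None
-- ===== Notes on version B (the rewrite author's own statement) =====
-- stated objective: alternative
-- what changed: Instead of one substring search per keyword, B scans the lowercased text once position by position, matching all keywords in place with startswith and collecting them in a set, then tallies the matched set against the two keyword groups.
import Mathlib
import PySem

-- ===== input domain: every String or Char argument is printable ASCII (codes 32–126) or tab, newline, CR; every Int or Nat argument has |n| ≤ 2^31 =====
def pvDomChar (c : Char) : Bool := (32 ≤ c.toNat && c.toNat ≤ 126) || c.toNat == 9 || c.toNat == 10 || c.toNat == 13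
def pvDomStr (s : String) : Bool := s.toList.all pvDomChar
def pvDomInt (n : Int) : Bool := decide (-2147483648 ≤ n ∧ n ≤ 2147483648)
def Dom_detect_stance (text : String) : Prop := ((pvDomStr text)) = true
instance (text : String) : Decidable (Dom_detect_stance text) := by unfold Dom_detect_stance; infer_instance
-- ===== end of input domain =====

-- B scans the lowercased text once, position by position, matching every keyword in place
-- with startswith into a set, then tallies that set; A runs one substring search per keyword
-- (objective: alternative).

-- ===== PORT A =====
def detect_stance (text : String) : Option String :=
  let text_lower := PySem.Str.lower text
  let bullish_signals : Int :=
    (["buy", "bullish", "strong", "outperform", "beat", "growth"]).foldl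
      (fun acc w => if PySem.Str.isIn w text_lower then acc + 1 else acc) 0
  let bearish_signals : Int :=
    (["sell", "bearish", "weak", "underperform", "miss", "decline"]).foldl
      (fun acc w => if PySem.Str.isIn w text_lower then acc + 1 else acc) 0
  if bullish_signals > bearish_signals then some "bullish"
  else if bearish_signals > bullish_signals then some "bearish"
  else none

-- ===== PORT B =====
def stanceBull : List String := ["buy", "bullish", "strong", "outperform", "beat", "growth"]
def stanceBear : List String := ["sell", "bearish", "weak", "underperform", "miss", "decline"]

-- t.startswith(w, i) with 0 ≤ i < len(t) is exactly 'w.toList is a prefix of t.toList.drop i'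
def detect_stance_alt (text : String) : Option String :=
  let t := PySem.Str.lower text
  let tl := t.toList
  let found : PySem.Set String :=
    (List.range tl.length).foldl
      (fun s i =>
        (stanceBull ++ stanceBear).foldl
          (fun s w => if PySem.Chars.startswith (tl.drop i) w.toList then PySem.Set.add s w else s) s)
      PySem.Set.empty
  let bull : Int := stanceBull.foldl (fun acc w => if PySem.Set.contains found w then acc + 1 else acc) 0
  let bear : Int := stanceBear.foldl (fun acc w => if PySem.Set.contains found w then acc + 1 else acc) 0
  if bull > bear then some "bullish"
  else if bear > bull then some "bearish"
  else none

-- ===== PRECONDITION & SPEC =====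
def Spec_detect_stance (text : String) (out : Option String) : Prop := out = detect_stance_alt text
instance (text : String) (out : Option String) : Decidable (Spec_detect_stance text out) := by unfold Spec_detect_stance; infer_instance

-- ===== CLAIM (what is proved, stated in full; the proofs are below) =====
def Claim_equal_detect_stance : Prop := ∀ (text : String), Dom_detect_stance text → Spec_detect_stance text (detect_stance text)

-- ===== LEMMAS AND PROOFS =====

-- after the inner fold over a word list, membership = old membership or a match at position i
theorem mem_innerFold (tl : List Char) (i : Nat) (ws : List String) (s : PySem.Set String) (w : String) :
    w ∈ ws.foldl (fun s w => if PySem.Chars.startswith (tl.drop i) w.toList then PySem.Set.add s w else s) s ↔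
      w ∈ s ∨ (w ∈ ws ∧ PySem.Chars.startswith (tl.drop i) w.toList = true) := by
  induction ws generalizing s with
  | nil => simp
  | cons x xs ih =>
    simp only [List.foldl_cons, ih]
    by_cases h : PySem.Chars.startswith (tl.drop i) x.toList = true
    · simp only [if_pos h, PySem.Set.mem_add, List.mem_cons]
      constructor
      · rintro (⟨hs | rfl⟩ | ⟨hx, hm⟩)
        · exact Or.inl hs
        · exact Or.inr ⟨Or.inl rfl, h⟩
        · exact Or.inr ⟨Or.inr hx, hm⟩
      · rintro (hs | ⟨rfl | hx, hm⟩)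
        · exact Or.inl (Or.inl hs)
        · exact Or.inl (Or.inr rfl)
        · exact Or.inr ⟨hx, hm⟩
    · simp only [if_neg h, List.mem_cons]
      constructor
      · rintro (hs | ⟨hx, hm⟩)
        · exact Or.inl hs
        · exact Or.inr ⟨Or.inr hx, hm⟩
      · rintro (hs | ⟨rfl | hx, hm⟩)
        · exact Or.inl hs
        · exact absurd hm h
        · exact Or.inr ⟨hx, hm⟩

-- after the outer fold over positions, membership = old membership or a match at some listed position
theorem mem_outerFold (tl : List Char) (ws : List String) (idxs : List Nat) (s : PySem.Set String) (w : String) :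
    w ∈ idxs.foldl
        (fun s i => ws.foldl (fun s w => if PySem.Chars.startswith (tl.drop i) w.toList then PySem.Set.add s w else s) s) s ↔
      w ∈ s ∨ (w ∈ ws ∧ ∃ i ∈ idxs, PySem.Chars.startswith (tl.drop i) w.toList = true) := by
  induction idxs generalizing s with
  | nil => simp
  | cons j js ih =>
    simp only [List.foldl_cons, ih, mem_innerFold, List.mem_cons]
    constructor
    · rintro ((hs | ⟨hw, hm⟩) | ⟨hw, i, hi, hm⟩)
      · exact Or.inl hs
      · exact Or.inr ⟨hw, j, Or.inl rfl, hm⟩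
      · exact Or.inr ⟨hw, i, Or.inr hi, hm⟩
    · rintro (hs | ⟨hw, i, rfl | hi, hm⟩)
      · exact Or.inl (Or.inl hs)
      · exact Or.inl (Or.inr ⟨hw, hm⟩)
      · exact Or.inr ⟨hw, i, hi, hm⟩

-- for a nonempty word, a bounded startswith match is exactly Python's 'w in t'
theorem found_mem_iff_isIn (t w : String) (hw : w.toList ≠ []) :
    ((∃ i ∈ List.range t.toList.length, PySem.Chars.startswith (t.toList.drop i) w.toList = true) ↔
      PySem.Str.isIn w t = true) := by
  rw [PySem.Str.isIn_iff_infix, ← PySem.Chars.isIn_iff_infix,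
      ← PySem.Chars.exists_prefix_drop_iff_isIn]
  constructor
  · rintro ⟨i, _, hm⟩
    exact ⟨i, (PySem.Chars.startswith_iff _ _).mp hm⟩
  · rintro ⟨j, hp⟩
    by_cases hj : j < t.toList.length
    · exact ⟨j, List.mem_range.mpr hj, (PySem.Chars.startswith_iff _ _).mpr hp⟩
    · exfalso
      rw [List.drop_eq_nil_of_le (le_of_not_gt hj)] at hp
      exact hw (List.prefix_nil.mp hp)

-- ===== VERDICT (by name: the statement is the Claim_ definition above) =====
theorem detect_stance_spec : Claim_equal_detect_stance := by
  intro text _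
  unfold Spec_detect_stance detect_stance detect_stance_alt
  dsimp only
  set t := PySem.Str.lower text with ht
  have key : ∀ w : String, w ∈ stanceBull ++ stanceBear →
      PySem.Set.contains
        ((List.range t.toList.length).foldl
          (fun s i =>
            (stanceBull ++ stanceBear).foldl
              (fun s w => if PySem.Chars.startswith (t.toList.drop i) w.toList then PySem.Set.add s w else s) s)
          PySem.Set.empty) w = PySem.Str.isIn w t := by
    intro w hw
    have hw' : w.toList ≠ [] := by
      fin_cases hw <;> decide
    have hmem := mem_outerFold t.toList (stanceBull ++ stanceBear) (List.range t.toList.length) PySem.Set.empty w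
    by_cases hin : PySem.Str.isIn w t = true
    · have : (∃ i ∈ List.range t.toList.length, PySem.Chars.startswith (t.toList.drop i) w.toList = true) :=
        (found_mem_iff_isIn t w hw').mpr hin
      rw [hin]
      have := hmem.mpr (Or.inr ⟨hw, this⟩)
      simpa [PySem.Set.contains] using this
    · rw [Bool.not_eq_true] at hin
      rw [hin]
      rw [← Bool.not_eq_true]
      intro hc
      have := hmem.mp (by simpa [PySem.Set.contains] using hc)
      rcases this with h | ⟨_, hex⟩
      · simp [PySem.Set.empty] at h
      · have h2 := (found_mem_iff_isIn t w hw').mp hex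
        rw [hin] at h2
        exact Bool.noConfusion h2
  have hbull : ∀ (found : PySem.Set String), (∀ w ∈ stanceBull, PySem.Set.contains found w = PySem.Str.isIn w t) →
      stanceBull.foldl (fun (acc : Int) w => if PySem.Set.contains found w then acc + 1 else acc) 0 =
      stanceBull.foldl (fun (acc : Int) w => if PySem.Str.isIn w t then acc + 1 else acc) 0 := by
    intro found h
    apply PySem.List.foldl_congr_mem
    intro acc x hx
    rw [h x hx]
  have hbear : ∀ (found : PySem.Set String), (∀ w ∈ stanceBear, PySem.Set.contains found w = PySem.Str.isIn w t) →
      stanceBear.foldl (fun (acc : Int) w => if PySem.Set.contains found w then acc + 1 else acc) 0 =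
      stanceBear.foldl (fun (acc : Int) w => if PySem.Str.isIn w t then acc + 1 else acc) 0 := by
    intro found h
    apply PySem.List.foldl_congr_mem
    intro acc x hx
    rw [h x hx]
  rw [hbull _ (fun w h => key w (List.mem_append_left stanceBear h)),
      hbear _ (fun w h => key w (List.mem_append_right stanceBull h))]
  rfl
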